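-- pv_equiv track=rewrite | github.com/pypi-data/pypi-mirror-401 | packages/uht-discovery/uht_discovery-0.1.2-py3-none-any.whl/uht_discovery/core/biophysical_signals_analysis.py | calculate
-- ===== SOURCE A (Python) =====
-- def calculate(sequence, length=20):
--     n_term = sequence[:min(length, len(sequence))]
--     charge = 0
--     for aa in n_term:
--         if aa in 'DE':
--             charge -= 1
--         elif aa in 'HKR':
--             charge += 1
--     return charge
-- ===== SOURCE B (Python) =====
-- def calculate(sequence, length=20):
--     n_term = sequence[:min(length, len(sequence))]
--     counts = {}
--     for aa in n_term:
--         counts[aa] = counts.get(aa, 0) + 1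
--     return sum(counts.get(a, 0) for a in 'HKR') - sum(counts.get(a, 0) for a in 'DE')
-- ===== Notes on version B (the rewrite author's own statement) =====
-- stated objective: alternative
-- what changed: Replaces the per-character branch loop with a frequency table built once over the N-terminal prefix, followed by a pass over the fixed charged-residue classes HKR and DE.
import Mathlib
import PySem

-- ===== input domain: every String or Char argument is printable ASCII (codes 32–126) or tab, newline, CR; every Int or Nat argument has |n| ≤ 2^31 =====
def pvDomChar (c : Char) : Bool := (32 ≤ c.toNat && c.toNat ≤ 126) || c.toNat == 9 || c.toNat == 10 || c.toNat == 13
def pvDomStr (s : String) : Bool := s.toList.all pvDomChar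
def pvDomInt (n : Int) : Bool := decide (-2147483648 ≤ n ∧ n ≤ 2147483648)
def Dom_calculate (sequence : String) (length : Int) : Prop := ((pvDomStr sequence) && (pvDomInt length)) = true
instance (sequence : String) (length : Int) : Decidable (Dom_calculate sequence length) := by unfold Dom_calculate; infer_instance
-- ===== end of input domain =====

-- B replaces A's per-character branch loop by a frequency table built once over the
-- prefix, followed by a pass over the fixed residue classes HKR and DE (alternative
-- decomposition, same cost).

-- ===== PORT A =====
def calculate (sequence : String) (length : Int) : Int :=
  let n_term := PySem.List.slice sequence.toList none
    (some (min length (sequence.toList.length : Int)))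
  n_term.foldl (fun charge aa =>
    if aa ∈ "DE".toList then charge - 1
    else if aa ∈ "HKR".toList then charge + 1
    else charge) 0

-- ===== PORT B =====
def calculate_alt (sequence : String) (length : Int) : Int :=
  let n_term := PySem.List.slice sequence.toList none
    (some (min length (sequence.toList.length : Int)))
  let counts : PySem.Dict Char Int :=
    n_term.foldl (fun d aa => d.insert aa (d.getD aa 0 + 1)) PySem.Dict.empty
  ("HKR".toList.map (fun a => counts.getD a 0)).sum
    - ("DE".toList.map (fun a => counts.getD a 0)).sum

-- ===== PRECONDITION & SPEC =====
def Spec_calculate (sequence : String) (length : Int) (out : Int) : Prop := out = calculate_alt sequence length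
instance (sequence : String) (length : Int) (out : Int) : Decidable (Spec_calculate sequence length out) := by unfold Spec_calculate; infer_instance

-- ===== CLAIM (what is proved, stated in full; the proofs are below) =====
def Claim_equal_calculate : Prop := ∀ (sequence : String) (length : Int), Dom_calculate sequence length → Spec_calculate sequence length (calculate sequence length)

-- ===== LEMMAS AND PROOFS =====

theorem foldl_charge (l : List Char) (c : Int) :
    l.foldl (fun charge aa =>
      if aa ∈ "DE".toList then charge - 1
      else if aa ∈ "HKR".toList then charge + 1
      else charge) c
    = c + ((l.count 'H' + l.count 'K' + l.count 'R' : Int)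
        - (l.count 'D' + l.count 'E' : Int)) := by
  induction l generalizing c with
  | nil => simp
  | cons x xs ih =>
    simp only [List.foldl_cons, List.count_cons, ih]
    by_cases hD : x = 'D' <;> by_cases hE : x = 'E' <;> by_cases hH : x = 'H' <;>
      by_cases hK : x = 'K' <;> by_cases hR : x = 'R' <;>
      simp_all <;> omega

theorem calculate_spec : Claim_equal_calculate := by
  intro sequence length _
  unfold Spec_calculate calculate calculate_alt
  simp only [foldl_charge, PySem.Dict.getD_foldl_insert_add_one, PySem.Dict.getD_empty]
  simp only [show "HKR".toList = ['H','K','R'] from rfl,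
    show "DE".toList = ['D','E'] from rfl,
    List.map_cons, List.map_nil, List.sum_cons, List.sum_nil]
  ring
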